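-- pv_equiv track=rewrite | github.com/guilhermebaos/HackerRank | Tests/Problem_Solving_Medium/001_User_Friendly_Password_System.py | authorize
-- ===== SOURCE A (Python) =====
-- def authorize(password, attempt):
--     string = []
--     for letter in password:
--         string += [ord(letter)]
--     p = 131
--     M = 1000000007
--     n = len(string) - 1
--     p_exponents = [p ** i for i in range(0, n + 2)]
--     hash_value = 0
--     for index, letter in enumerate(string):
--         hash_value += letter * p_exponents[n - index]
--     hash_value %= M
--     if attempt == hash_value:
--         return True
--     string += [0]
--     n += 1
--     for append in list(range(48, 58)) + list(range(65, 91)) + list(range(97, 123)):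
--         string[-1] = append
--         hash_value = 0
--         for index, letter in enumerate(string):
--             hash_value += letter * p_exponents[n - index]
--         hash_value %= M
--         if attempt == hash_value:
--             return True
--     return False
-- ===== SOURCE B (Python) =====
-- def authorize(password, attempt):
--     M = 1000000007
--     h = 0
--     for letter in password:
--         h = (h * 131 + ord(letter)) % M
--     if attempt == h:
--         return True
--     return any(attempt == (h * 131 + c) % M
--                for c in [*range(48, 58), *range(65, 91), *range(97, 123)])
-- ===== Notes on version B (the rewrite author's own statement) =====
-- stated objective: faster
-- what changed: Replaced A's exponent table and full O(n) bignum re-hash for each of the 62 one-character extensions by a single modular Horner pass over the password followed by an O(1) modular update h*131+c per candidate character.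
import Mathlib
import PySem

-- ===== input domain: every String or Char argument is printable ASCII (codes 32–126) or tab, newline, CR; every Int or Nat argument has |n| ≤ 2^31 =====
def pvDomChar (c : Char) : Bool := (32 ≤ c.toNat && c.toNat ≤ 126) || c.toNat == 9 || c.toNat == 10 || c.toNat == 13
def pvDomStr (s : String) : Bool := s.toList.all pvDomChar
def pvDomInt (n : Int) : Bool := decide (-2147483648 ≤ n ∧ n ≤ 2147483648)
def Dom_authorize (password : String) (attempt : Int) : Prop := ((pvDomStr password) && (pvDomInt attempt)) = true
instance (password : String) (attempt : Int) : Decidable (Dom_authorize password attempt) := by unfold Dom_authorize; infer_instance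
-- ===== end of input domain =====

-- B replaces A's per-attempt O(n) bignum re-hash with one modular Horner pass and O(1) updates per appended character (objective: faster).

-- ===== PORT A =====
def authorize (password : String) (attempt : Int) : Bool :=
  let string : List Int := password.toList.foldl (fun acc letter => acc ++ [(letter.toNat : Int)]) []
  let p : Int := 131
  let M : Int := 1000000007
  let n : Int := (string.length : Int) - 1
  let p_exponents : List Int := (PySem.List.pyRange 0 (n + 2) 1).map (fun i => p ^ i.toNat)
  let hash_value : Int :=
    (PySem.List.enumerate string 0).foldl
      (fun h q => h + q.2 * PySem.List.pyGetD p_exponents (n - q.1) 0) 0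
  let hash_value := PySem.Int.mod hash_value M
  if attempt == hash_value then true
  else
    let string := string ++ [0]
    let n := n + 1
    (PySem.List.pyRange 48 58 1 ++ PySem.List.pyRange 65 91 1 ++ PySem.List.pyRange 97 123 1).any
      (fun append =>
        let string := PySem.List.pySetD string (-1) append
        let hash_value :=
          (PySem.List.enumerate string 0).foldl
            (fun h q => h + q.2 * PySem.List.pyGetD p_exponents (n - q.1) 0) 0
        attempt == PySem.Int.mod hash_value M)

-- ===== PORT B =====
def authorize_alt (password : String) (attempt : Int) : Bool :=
  let M : Int := 1000000007
  let h : Int := password.toList.foldl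
    (fun h letter => PySem.Int.mod (h * 131 + (letter.toNat : Int)) M) 0
  if attempt == h then true
  else
    (PySem.List.pyRange 48 58 1 ++ PySem.List.pyRange 65 91 1 ++ PySem.List.pyRange 97 123 1).any
      (fun c => attempt == PySem.Int.mod (h * 131 + c) M)

-- ===== PRECONDITION & SPEC =====
def Spec_authorize (password : String) (attempt : Int) (out : Bool) : Prop := out = authorize_alt password attempt
instance (password : String) (attempt : Int) (out : Bool) : Decidable (Spec_authorize password attempt out) := by unfold Spec_authorize; infer_instance

-- ===== CLAIM (what is proved, stated in full; the proofs are below) =====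
def Claim_equal_authorize : Prop := ∀ (password : String) (attempt : Int), Dom_authorize password attempt → Spec_authorize password attempt (authorize password attempt)

-- ===== LEMMAS AND PROOFS =====

-- one modular Horner step equals deferring the mod
lemma mod_step (a x : Int) :
    (a % 1000000007 * 131 + x) % 1000000007 = (a * 131 + x) % 1000000007 := by
  conv_lhs => rw [Int.add_emod, Int.mul_emod, Int.emod_emod_of_dvd a dvd_rfl,
    ← Int.mul_emod, ← Int.add_emod]

-- B's mod-each-step fold equals the pure Horner value mod M
lemma horner_mod (s : List Int) : ∀ (a : Int),
    s.foldl (fun h x => PySem.Int.mod (h * 131 + x) 1000000007) (a % 1000000007)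
      = (s.foldl (fun h x => h * 131 + x) a) % 1000000007 := by
  induction s with
  | nil => intro a; rfl
  | cons x t ih =>
    intro a
    simp only [List.foldl_cons]
    rw [show (PySem.Int.mod ((a % 1000000007) * 131 + x) 1000000007) = ((a % 1000000007) * 131 + x) % 1000000007 from PySem.Int.mod_eq_emod_of_pos (by norm_num), mod_step, ih]

-- A's exponent-table sum over enumerate equals the pure Horner value (shifted by the slack exponent)
lemma hashE (s : List Int) : ∀ (n N h0 : Int), (s.length : Int) ≤ n + 1 → n < N →
    (PySem.List.enumerate s 0).foldl
      (fun h q => h + q.2 *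
        PySem.List.pyGetD ((PySem.List.pyRange 0 N 1).map (fun i => (131:Int) ^ i.toNat)) (n - q.1) 0) h0
    = h0 + (s.foldl (fun a x => a * 131 + x) 0) * 131 ^ ((n + 1 - (s.length : Int)).toNat) := by
  induction s using List.reverseRecOn with
  | nil => intro n N h0 _ _; simp [PySem.List.enumerate]
  | append_singleton t x ih =>
    intro n N h0 hlen hN
    have hL : (t.length : Int) ≤ n := by
      have : ((t ++ [x]).length : Int) = (t.length : Int) + 1 := by simp
      omega
    rw [PySem.List.enumerate_append, List.foldl_append, ih n N h0 (by omega) hN]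
    simp only [PySem.List.enumerate, List.foldl_cons, List.foldl_nil, List.foldl_append]
    have hidx : PySem.List.pyGetD
        ((PySem.List.pyRange 0 N 1).map (fun i => (131:Int) ^ i.toNat)) (n - (0 + (t.length : Int))) 0
        = (131:Int) ^ ((n - (t.length : Int)).toNat) := by
      rw [PySem.List.pyGetD_map_pyRange_of_nonneg _ _ _ _ (by omega) (by omega)]
      norm_num
    rw [hidx]
    have h1 : ((t ++ [x]).length : Int) = (t.length : Int) + 1 := by simp
    have e1 : (n + 1 - (t.length : Int)).toNat = (n - (t.length : Int)).toNat + 1 := by omega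
    have e2 : (n + 1 - ((t ++ [x]).length : Int)).toNat = (n - (t.length : Int)).toNat := by omega
    rw [e1, e2]
    ring

-- the in-place string[-1] = v on string + [0]
lemma pySetD_append_neg_one (xs : List Int) (y v : Int) :
    PySem.List.pySetD (xs ++ [y]) (-1) v = xs ++ [v] := by
  have h : PySem.List.pySet? (xs ++ [y]) (-1) v = some (xs ++ [v]) := by
    simp [PySem.List.pySet?, PySem.List.pyIdx?]
  simp [PySem.List.pySetD, h]

-- ===== VERDICT (by name: the statement is the Claim_ definition above) =====
lemma hornerP_append (t : List Int) (x : Int) :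
    (t ++ [x]).foldl (fun a y => a * 131 + y) 0 = (t.foldl (fun a y => a * 131 + y) 0) * 131 + x := by
  rw [List.foldl_append]; rfl

theorem authorize_spec : Claim_equal_authorize := by
  intro password attempt _
  unfold Spec_authorize authorize authorize_alt
  simp only [PySem.List.foldl_append_singleton_eq_map, List.nil_append]
  set s : List Int := password.toList.map (fun letter => (letter.toNat : Int)) with hs
  have hB : s.foldl (fun h x => PySem.Int.mod (h * 131 + x) 1000000007) 0
      = (s.foldl (fun h x => h * 131 + x) 0) % 1000000007 := by
    have := horner_mod s 0
    simpa using this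
  rw [show password.toList.foldl (fun h letter => PySem.Int.mod (h * 131 + (letter.toNat : Int)) 1000000007) 0
      = s.foldl (fun h x => PySem.Int.mod (h * 131 + x) 1000000007) 0 from by
    rw [hs, List.foldl_map]]
  have hA := hashE s ((s.length : Int) - 1) ((s.length : Int) - 1 + 2) 0 (by omega) (by omega)
  have h0 : ((s.length : Int) - 1 + 1 - (s.length : Int)).toNat = 0 := by omega
  rw [h0] at hA
  simp only [pow_zero, mul_one, zero_add] at hA
  rw [hA, hB,
    show PySem.Int.mod (s.foldl (fun a x => a * 131 + x) 0) 1000000007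
      = (s.foldl (fun a x => a * 131 + x) 0) % 1000000007 from
      PySem.Int.mod_eq_emod_of_pos (by norm_num)]
  congr 1
  refine congrArg _ (funext fun append => ?_)
  rw [pySetD_append_neg_one]
  have hA2 := hashE (s ++ [append]) ((s.length : Int) - 1 + 1) ((s.length : Int) - 1 + 2) 0
    (by simp only [List.length_append, List.length_cons, List.length_nil]; push_cast; omega) (by omega)
  have h02 : ((s.length : Int) - 1 + 1 + 1 - ((s ++ [append]).length : Int)).toNat = 0 := by
    simp only [List.length_append, List.length_cons, List.length_nil]; push_cast; omega
  rw [h02] at hA2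
  simp only [pow_zero, mul_one, zero_add] at hA2
  rw [hA2, hornerP_append]
  rw [show ∀ z : Int, PySem.Int.mod z 1000000007 = z % 1000000007 from
      fun z => PySem.Int.mod_eq_emod_of_pos (by norm_num)]
  rw [show ∀ z : Int, PySem.Int.mod z 1000000007 = z % 1000000007 from
      fun z => PySem.Int.mod_eq_emod_of_pos (by norm_num)]
  rw [mod_step]
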